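-- pv_equiv track=rewrite | github.com/Delnold/marshallyin.com-parser | marshallyin/marshallyin/data_formatting/vocabulary.py | words_readings_meanings_separator
-- ===== SOURCE A (Python) =====
-- from typing import Tuple
--
-- def words_readings_meanings_separator(reading_meaning_kanji: list) -> Tuple[list, list, list]:
--     words = []
--     readings = []
--     meanings = []
--     for arr in reading_meaning_kanji:
--         if arr[0] == "Word":
--             words += arr[1:]
--         elif arr[0] == "Reading":
--             readings += arr[1:]
--         elif arr[0] == "Meaning":
--             meanings += arr[1:]
--     return words, readings, meanings
-- ===== SOURCE B (Python) =====
-- def words_readings_meanings_separator(reading_meaning_kanji):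
--     words = [x for arr in reading_meaning_kanji if arr[0] == "Word" for x in arr[1:]]
--     readings = [x for arr in reading_meaning_kanji if arr[0] == "Reading" for x in arr[1:]]
--     meanings = [x for arr in reading_meaning_kanji if arr[0] == "Meaning" for x in arr[1:]]
--     return words, readings, meanings
-- ===== Notes on version B (the rewrite author's own statement) =====
-- stated objective: idiomatic
-- what changed: Replaces the single branch-dispatching loop over three mutable accumulators with three independent filter-and-flatten comprehensions, one per tag.
import Mathlib
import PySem

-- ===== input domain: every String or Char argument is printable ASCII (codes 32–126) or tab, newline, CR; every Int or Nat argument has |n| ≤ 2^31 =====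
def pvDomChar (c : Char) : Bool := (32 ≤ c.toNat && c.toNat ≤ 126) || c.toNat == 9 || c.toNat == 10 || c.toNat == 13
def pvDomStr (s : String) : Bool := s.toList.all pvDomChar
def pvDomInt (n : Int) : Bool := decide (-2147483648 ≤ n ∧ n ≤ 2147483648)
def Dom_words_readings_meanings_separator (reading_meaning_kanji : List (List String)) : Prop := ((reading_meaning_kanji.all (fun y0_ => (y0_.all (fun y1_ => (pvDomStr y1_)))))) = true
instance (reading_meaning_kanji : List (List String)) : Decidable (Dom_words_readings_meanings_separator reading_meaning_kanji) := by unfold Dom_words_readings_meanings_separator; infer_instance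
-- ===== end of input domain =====

-- B replaces the single branch-dispatching loop over three mutable accumulators with
-- three independent filter-and-flatten passes, one per tag (idiomatic decomposition).

-- ===== PORT A =====
-- one loop iteration of A: dispatch on arr[0] and extend the matching accumulator with arr[1:]
def wrmsStep (st : List String × List String × List String) (arr : List String) :
    List String × List String × List String :=
  match PySem.List.pyGet? arr 0 with
  | none => st  -- Python raises IndexError here; excluded by Pre_
  | some h =>
    if h = "Word" then (st.1 ++ PySem.List.slice arr (some 1) none, st.2.1, st.2.2)
    else if h = "Reading" then (st.1, st.2.1 ++ PySem.List.slice arr (some 1) none, st.2.2)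
    else if h = "Meaning" then (st.1, st.2.1, st.2.2 ++ PySem.List.slice arr (some 1) none)
    else st

def words_readings_meanings_separator (reading_meaning_kanji : List (List String)) :
    List String × List String × List String :=
  reading_meaning_kanji.foldl wrmsStep ([], [], [])

-- ===== PORT B =====
-- [x for arr in l if arr[0] == tag for x in arr[1:]]
def wrmsBucket (tag : String) (l : List (List String)) : List String :=
  (l.filter (fun arr => PySem.List.pyGet? arr 0 == some tag)).flatMap
    (fun arr => PySem.List.slice arr (some 1) none)

def words_readings_meanings_separator_alt (reading_meaning_kanji : List (List String)) :
    List String × List String × List String :=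
  (wrmsBucket "Word" reading_meaning_kanji,
   wrmsBucket "Reading" reading_meaning_kanji,
   wrmsBucket "Meaning" reading_meaning_kanji)

-- ===== PRECONDITION & SPEC =====
-- Pre_ excludes inputs containing an empty sublist: there arr[0] raises IndexError in both A and B.
def Pre_words_readings_meanings_separator (reading_meaning_kanji : List (List String)) : Prop :=
  ∀ arr ∈ reading_meaning_kanji, arr ≠ []
instance (reading_meaning_kanji : List (List String)) : Decidable (Pre_words_readings_meanings_separator reading_meaning_kanji) := by unfold Pre_words_readings_meanings_separator; infer_instance

def pvWitness_words_readings_meanings_separator : List (List String) :=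
  [["Word", "a"], ["Reading", "r"], ["Meaning", "m"], ["Other"]]

def Spec_words_readings_meanings_separator (reading_meaning_kanji : List (List String)) (out : List String × List String × List String) : Prop := out = words_readings_meanings_separator_alt reading_meaning_kanji
instance (reading_meaning_kanji : List (List String)) (out : List String × List String × List String) : Decidable (Spec_words_readings_meanings_separator reading_meaning_kanji out) := by unfold Spec_words_readings_meanings_separator; infer_instance

-- ===== CLAIM (what is proved, stated in full; the proofs are below) =====
def Claim_equal_words_readings_meanings_separator : Prop := ∀ (reading_meaning_kanji : List (List String)), Dom_words_readings_meanings_separator reading_meaning_kanji → Pre_words_readings_meanings_separator reading_meaning_kanji → Spec_words_readings_meanings_separator reading_meaning_kanji (words_readings_meanings_separator reading_meaning_kanji)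

-- ===== LEMMAS AND PROOFS =====

theorem wrms_foldl_eq (l : List (List String)) (w r m : List String)
    (h : ∀ arr ∈ l, arr ≠ []) :
    l.foldl wrmsStep (w, r, m) =
      (w ++ wrmsBucket "Word" l, r ++ wrmsBucket "Reading" l, m ++ wrmsBucket "Meaning" l) := by
  induction l generalizing w r m with
  | nil => simp [wrmsBucket]
  | cons a t ih =>
    obtain ⟨h0, ht⟩ := List.forall_mem_cons.mp h
    obtain ⟨x, xs, rfl⟩ := List.exists_cons_of_ne_nil h0
    have hget : PySem.List.pyGet? (x :: xs) (0 : Int) = some x := by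
      simp [PySem.List.pyGet?, PySem.List.pyIdx?]
    simp only [List.foldl_cons, wrmsStep, hget]
    by_cases hw : x = "Word" <;> by_cases hr : x = "Reading" <;> by_cases hm : x = "Meaning" <;>
      simp_all [wrmsBucket, ih _ _ _ ht]
theorem words_readings_meanings_separator_spec : Claim_equal_words_readings_meanings_separator := by
  intro l _ hpre
  unfold Spec_words_readings_meanings_separator words_readings_meanings_separator
    words_readings_meanings_separator_alt
  simp [wrms_foldl_eq l [] [] [] hpre]
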